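-- pv_equiv track=rewrite | github.com/LingZichao/AgenticPipeViewer | src/base.py | split_signal
-- ===== SOURCE A (Python) =====
-- from typing import List, Union, Sequence, Optional, Dict, Any
--
-- def split_signal(signal_val: str, num_parts: int, bit_width: int = 0) -> List[int]:
--     """Split a wide signal value into equal parts
--
--     Args:
--         signal_val: Hex signal value (with or without 0x prefix)
--         num_parts: Number of parts to split into
--         bit_width: Optional explicit bit width. If 0, infer from string length.
--
--     Returns:
--         List of integer values for each part (LSB first)
--     """
--     if signal_val.startswith('0x') or signal_val.startswith('0X'):
--         signal_val = signal_val[2:]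
--     val_int = int(signal_val, 16)
--
--     # If bit_width not specified, infer from string length
--     if bit_width == 0:
--         total_bits = len(signal_val) * 4
--     else:
--         total_bits = bit_width
--
--     bits_per_part = total_bits // num_parts
--     mask = (1 << bits_per_part) - 1
--     return [(val_int >> (i * bits_per_part)) & mask for i in range(num_parts)]
-- ===== SOURCE B (Python) =====
-- def split_signal(signal_val: str, num_parts: int, bit_width: int = 0):
--     """Split a wide hex signal value into equal parts (LSB first).
--
--     Consumes the value progressively with divmod instead of recomputing
--     an absolute shift and mask per index.
--     """
--     if signal_val.startswith('0x') or signal_val.startswith('0X'):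
--         signal_val = signal_val[2:]
--     total_bits = len(signal_val) * 4 if bit_width == 0 else bit_width
--     modulus = 1 << (total_bits // num_parts)
--     rem = int(signal_val, 16)
--     parts = []
--     for _ in range(num_parts):
--         rem, part = divmod(rem, modulus)
--         parts.append(part)
--     return parts
-- ===== Notes on version B (the rewrite author's own statement) =====
-- stated objective: alternative
-- what changed: B consumes the value progressively with an accumulator loop of divmod(rem, modulus) calls (arithmetic quotient/remainder carried between iterations, no per-index state), instead of A's comprehension that recomputes an absolute shift i*bits_per_part and applies a bit mask for every index.
import Mathlib
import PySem

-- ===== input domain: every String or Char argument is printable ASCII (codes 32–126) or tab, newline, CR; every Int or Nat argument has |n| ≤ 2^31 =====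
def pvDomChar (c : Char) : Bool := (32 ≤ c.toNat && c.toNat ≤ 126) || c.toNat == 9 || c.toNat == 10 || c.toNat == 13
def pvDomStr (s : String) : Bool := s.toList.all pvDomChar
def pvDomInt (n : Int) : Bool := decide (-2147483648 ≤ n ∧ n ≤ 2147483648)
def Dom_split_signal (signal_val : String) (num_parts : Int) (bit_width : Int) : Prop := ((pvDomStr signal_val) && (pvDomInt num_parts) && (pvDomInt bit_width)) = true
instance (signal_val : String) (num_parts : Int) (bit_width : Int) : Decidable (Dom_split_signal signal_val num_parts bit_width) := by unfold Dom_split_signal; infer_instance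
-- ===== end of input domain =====

-- B consumes the value with a running divmod accumulator instead of A's per-index shift-and-mask comprehension; same results, no speed claim.

-- ===== PORT A =====
def split_signal (signal_val : String) (num_parts : Int) (bit_width : Int) : List Int :=
  let sv := if PySem.Str.startswith signal_val "0x" || PySem.Str.startswith signal_val "0X" then
      PySem.Str.slice signal_val (some 2) none else signal_val
  match PySem.Int.ofStrBase? sv 16 with
  | none => []  -- int(signal_val, 16) raises ValueError here; excluded by Pre_
  | some val_int =>
    let total_bits : Int := if bit_width = 0 then PySem.Str.len sv * 4 else bit_width
    let bits_per_part := PySem.Int.floordiv total_bits num_parts  -- num_parts ≠ 0 in Pre_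
    let mask : Int := (1 <<< bits_per_part.toNat) - 1  -- 0 ≤ bits_per_part in Pre_ (a negative shift raises)
    (PySem.List.pyRange 0 num_parts 1).map
      (fun i => PySem.Int.band (val_int >>> (i * bits_per_part).toNat) mask)

-- ===== PORT B =====
-- the 'for _ in range(num_parts): rem, part = divmod(rem, modulus); parts.append(part)' loop of Source B
def pvAltLoop (n : Nat) (rem modulus : Int) : List Int :=
  match n with
  | 0 => []
  | Nat.succ k =>
    match PySem.Int.divmod? rem modulus with
    | none => []  -- divmod by zero; unreachable here since modulus = 1 <<< _ ≥ 1
    | some (q, r) => r :: pvAltLoop k q modulus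

def split_signal_alt (signal_val : String) (num_parts : Int) (bit_width : Int) : List Int :=
  let sv := if PySem.Str.startswith signal_val "0x" || PySem.Str.startswith signal_val "0X" then
      PySem.Str.slice signal_val (some 2) none else signal_val
  let total_bits : Int := if bit_width = 0 then PySem.Str.len sv * 4 else bit_width
  let modulus : Int := 1 <<< (PySem.Int.floordiv total_bits num_parts).toNat
  match PySem.Int.ofStrBase? sv 16 with
  | none => []
  | some rem => pvAltLoop num_parts.toNat rem modulus

-- ===== PRECONDITION & SPEC =====
-- Pre_ excludes exactly the inputs where Python A raises: an invalid base-16 literal (ValueError),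
-- num_parts = 0 (ZeroDivisionError), and a negative bits-per-part (negative shift count, ValueError).
def Pre_split_signal (signal_val : String) (num_parts : Int) (bit_width : Int) : Prop :=
  let sv := if PySem.Str.startswith signal_val "0x" || PySem.Str.startswith signal_val "0X" then
      PySem.Str.slice signal_val (some 2) none else signal_val
  (PySem.Int.ofStrBase? sv 16).isSome = true ∧ num_parts ≠ 0 ∧
    0 ≤ PySem.Int.floordiv (if bit_width = 0 then PySem.Str.len sv * 4 else bit_width) num_parts
instance (signal_val : String) (num_parts : Int) (bit_width : Int) : Decidable (Pre_split_signal signal_val num_parts bit_width) := by unfold Pre_split_signal; infer_instance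

def pvWitness_split_signal : String × Int × Int := ("0x1f2e", 2, 0)

def Spec_split_signal (signal_val : String) (num_parts : Int) (bit_width : Int) (out : List Int) : Prop := out = split_signal_alt signal_val num_parts bit_width
instance (signal_val : String) (num_parts : Int) (bit_width : Int) (out : List Int) : Decidable (Spec_split_signal signal_val num_parts bit_width out) := by unfold Spec_split_signal; infer_instance

-- ===== CLAIM (what is proved, stated in full; the proofs are below) =====
def Claim_equal_split_signal : Prop := ∀ (signal_val : String) (num_parts : Int) (bit_width : Int), Dom_split_signal signal_val num_parts bit_width → Pre_split_signal signal_val num_parts bit_width → Spec_split_signal signal_val num_parts bit_width (split_signal signal_val num_parts bit_width)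

-- ===== LEMMAS AND PROOFS =====

theorem pvOneShl (b : Nat) : ((1 <<< b : Nat) : Int) = ((2 ^ b : Nat) : Int) := by
  rw [Nat.one_shiftLeft]

-- Masking with 2^b - 1 is Python's % 2^b, also on negative values (two's complement).
theorem pvBand_mask (a : Int) (b : Nat) :
    PySem.Int.band a (((1 <<< b : Nat) : Int) - 1) = PySem.Int.mod a ((1 <<< b : Nat) : Int) := by
  have hM1 : 1 ≤ 2 ^ b := Nat.one_le_two_pow
  have hMpos : (0 : Int) < ((2 ^ b : Nat) : Int) := by positivity
  rw [pvOneShl, PySem.Int.mod_eq_emod_of_pos hMpos]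
  have h2 : (((2 ^ b : Nat) : Int) - 1).toNat = 2 ^ b - 1 := by omega
  by_cases ha : 0 ≤ a
  · rw [PySem.Int.band_of_nonneg ha (by omega), h2, Nat.and_two_pow_sub_one_eq_mod]
    push_cast
    rw [Int.toNat_of_nonneg ha]
  · unfold PySem.Int.band
    rw [if_neg ha, if_pos (by omega), h2]
    set n : Nat := (-a - 1).toNat with hn
    have ha2 : a = -((n : Int) + 1) := by omega
    rw [Nat.land_comm, Nat.and_two_pow_sub_one_eq_mod, ha2]
    have hr : n % 2 ^ b + 2 ^ b * (n / 2 ^ b) = n := Nat.mod_add_div n (2 ^ b)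
    have hrlt : n % 2 ^ b < 2 ^ b := Nat.mod_lt _ (by omega)
    have hcast : (n : Int) = ((n % 2 ^ b : Nat) : Int) + ((2 ^ b : Nat) : Int) * ((n / 2 ^ b : Nat) : Int) := by
      exact_mod_cast congrArg (fun t : Nat => (t : Int)) hr.symm
    have hRHS : ((2 ^ b - 1 - n % 2 ^ b : Nat) : Int) = ((2 ^ b : Nat) : Int) - 1 - ((n % 2 ^ b : Nat) : Int) := by
      omega
    have hX : -((n : Int) + 1) + ((2 ^ b : Nat) : Int) * (((n / 2 ^ b : Nat) : Int) + 1) = ((2 ^ b - 1 - n % 2 ^ b : Nat) : Int) := by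
      rw [hRHS]; linear_combination -hcast
    have hb1 : (0:Int) ≤ ((2 ^ b - 1 - n % 2 ^ b : Nat) : Int) := by omega
    have hb2 : ((2 ^ b - 1 - n % 2 ^ b : Nat) : Int) < ((2 ^ b : Nat) : Int) := by omega
    calc ((2 ^ b - 1 - n % 2 ^ b : Nat) : Int)
        = ((2 ^ b - 1 - n % 2 ^ b : Nat) : Int) % ((2 ^ b : Nat) : Int) := (Int.emod_eq_of_lt hb1 hb2).symm
      _ = (-((n : Int) + 1) + ((2 ^ b : Nat) : Int) * (((n / 2 ^ b : Nat) : Int) + 1)) % ((2 ^ b : Nat) : Int) := by rw [hX]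
      _ = -((n : Int) + 1) % ((2 ^ b : Nat) : Int) := Int.add_mul_emod_self_left _ _ _

-- One floor division by 2^b composes with a later arithmetic shift: it adds b to the shift amount.
theorem pvShr_fdiv (v : Int) (b k : Nat) :
    (v.fdiv ((1 <<< b : Nat) : Int)) >>> k = v >>> (b + k) := by
  have hfd : v.fdiv ((2 ^ b : Nat) : Int) = v / ((2 ^ b : Nat) : Int) := by
    rw [Int.fdiv_eq_ediv]; simp
  rw [pvOneShl, hfd, Int.shiftRight_eq_div_pow, Int.shiftRight_eq_div_pow,
    Int.ediv_ediv_of_nonneg (by positivity)]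
  congr 1
  push_cast
  rw [pow_add]

-- B's divmod accumulator loop produces exactly A's shifted-and-masked parts.
theorem pvLoop_eq (k b : Nat) : ∀ v : Int,
    pvAltLoop k v ((1 <<< b : Nat) : Int) =
      (List.range k).map (fun i => PySem.Int.band (v >>> (i * b)) (((1 <<< b : Nat) : Int) - 1)) := by
  induction k with
  | zero => intro v; rfl
  | succ k ih =>
    intro v
    have hMne : ((1 <<< b : Nat) : Int) ≠ 0 := by rw [pvOneShl]; positivity
    simp only [pvAltLoop, PySem.Int.divmod?, if_neg hMne]
    rw [List.range_succ_eq_map, List.map_cons, List.map_map]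
    congr 1
    · rw [Nat.zero_mul, Int.shiftRight_zero, pvBand_mask]
      rfl
    · rw [ih (v.fdiv _)]
      refine List.map_congr_left (fun i _ => ?_)
      simp only [Function.comp]
      rw [pvShr_fdiv]
      rw [show b + i * b = Nat.succ i * b from by rw [Nat.succ_mul, Nat.add_comm]]

-- ===== VERDICT (by name: the statement is the Claim_ definition above) =====
theorem split_signal_spec : Claim_equal_split_signal := by
  intro sv np bw _hdom hpre
  unfold Pre_split_signal at hpre
  obtain ⟨hparse, hnp, hb⟩ := hpre
  unfold Spec_split_signal split_signal split_signal_alt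
  simp only []
  cases hcase : PySem.Int.ofStrBase?
      (if PySem.Str.startswith sv "0x" || PySem.Str.startswith sv "0X" then
        PySem.Str.slice sv (some 2) none else sv) 16 with
  | none => rfl
  | some v =>
    dsimp only
    rw [pvLoop_eq, PySem.List.pyRange_one, sub_zero, List.map_map]
    obtain ⟨m, hm⟩ := Int.eq_ofNat_of_zero_le hb
    refine List.map_congr_left (fun i _ => ?_)
    simp only [Function.comp, zero_add]
    congr 2
    rw [hm]
    rw [← Int.natCast_mul, Int.toNat_natCast, Int.toNat_natCast]
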